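-- pv_equiv track=rewrite | github.com/jsjm1986/prompt2graph | prompt_manager.py | _generate_relation_types_description
-- ===== SOURCE A (Python) =====
-- from typing import Dict, List, Optional
--
-- def _generate_relation_types_description(relation_types: Optional[List[str]] = None) -> str:
--     """生成关系类型描述"""
--     all_types = {
--         "层次关系": [
--             "is_a (是一个): 表示类别归属关系",
--             "part_of (部分-整体): 表示组成关系",
--             "belongs_to (从属): 表示归属关系"
--         ],
--         "动作关系": [
--             "creates (创建): 表示创建或生产关系",
--             "uses (使用): 表示使用或应用关系",
--             "affects (影响): 表示影响或作用关系",
--             "controls (控制): 表示控制或管理关系"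
--         ],
--         "属性关系": [
--             "has_property (具有属性): 表示特征属性",
--             "has_value (具有值): 表示数值属性",
--             "has_state (具有状态): 表示状态属性"
--         ],
--         "时间关系": [
--             "happens_before (发生在...之前): 表示时间先后顺序",
--             "happens_after (发生在...之后): 表示时间后续关系",
--             "happens_at (发生于): 表示时间点关系"
--         ],
--         "空间关系": [
--             "located_in (位于): 表示位置关系",
--             "near_to (靠近): 表示proximity关系",
--             "far_from (远离): 表示距离关系"
--         ],
--         "逻辑关系": [
--             "causes (导致): 表示因果关系",
--             "results_in (结果是): 表示结果关系",
--             "depends_on (依赖于): 表示依赖关系"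
--         ],
--         "社会关系": [
--             "works_for (工作于): 表示工作关系",
--             "collaborates_with (合作): 表示合作关系",
--             "competes_with (竞争): 表示竞争关系"
--         ]
--     }
--
--     if relation_types:
--         # 只包含指定的关系类型
--         filtered_types = {}
--         for category, types in all_types.items():
--             filtered = [t for t in types if any(rt in t for rt in relation_types)]
--             if filtered:
--                 filtered_types[category] = filtered
--         types_to_use = filtered_types
--     else:
--         types_to_use = all_types
--
--     # 生成描述文本
--     description = []
--     for category, types in types_to_use.items():
--         description.append(f"\n{category}:")
--         description.extend(f"- {t}" for t in types)
--
--     return "\n".join(description)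
-- ===== SOURCE B (Python) =====
-- from typing import Dict, List, Optional
--
-- # The rendered catalogue as a flat stream of text lines (blank line, header line,
-- # then "- " item lines per category) — same text A renders from its dict.
-- _LINES = [
--     "",
--     "层次关系:",
--     "- is_a (是一个): 表示类别归属关系",
--     "- part_of (部分-整体): 表示组成关系",
--     "- belongs_to (从属): 表示归属关系",
--     "",
--     "动作关系:",
--     "- creates (创建): 表示创建或生产关系",
--     "- uses (使用): 表示使用或应用关系",
--     "- affects (影响): 表示影响或作用关系",
--     "- controls (控制): 表示控制或管理关系",
--     "",
--     "属性关系:",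
--     "- has_property (具有属性): 表示特征属性",
--     "- has_value (具有值): 表示数值属性",
--     "- has_state (具有状态): 表示状态属性",
--     "",
--     "时间关系:",
--     "- happens_before (发生在...之前): 表示时间先后顺序",
--     "- happens_after (发生在...之后): 表示时间后续关系",
--     "- happens_at (发生于): 表示时间点关系",
--     "",
--     "空间关系:",
--     "- located_in (位于): 表示位置关系",
--     "- near_to (靠近): 表示proximity关系",
--     "- far_from (远离): 表示距离关系",
--     "",
--     "逻辑关系:",
--     "- causes (导致): 表示因果关系",
--     "- results_in (结果是): 表示结果关系",
--     "- depends_on (依赖于): 表示依赖关系",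
--     "",
--     "社会关系:",
--     "- works_for (工作于): 表示工作关系",
--     "- collaborates_with (合作): 表示合作关系",
--     "- competes_with (竞争): 表示竞争关系"
-- ]
--
-- def _generate_relation_types_description(relation_types: Optional[List[str]] = None) -> str:
--     """生成关系类型描述 — one streaming pass over the rendered line stream with lazy header emission."""
--     if not relation_types:
--         return "\n".join(_LINES)
--     out = []
--     pending = []
--     for ln in _LINES:
--         if ln.startswith("- "):
--             if any(rt in ln[2:] for rt in relation_types):
--                 out += pending
--                 pending = []
--                 out.append(ln)
--         elif ln == "":
--             pending = [ln]
--         else: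
--             pending.append(ln)
--     return "\n".join(out)
-- ===== Notes on version B (the rewrite author's own statement) =====
-- stated objective: alternative
-- what changed: B stores the catalogue as a pre-rendered flat list of text lines (blank line, header line, '- ' item lines) and makes one streaming pass over that line stream with a pending-header accumulator that is flushed lazily when an item line matches, replacing A's dict-filter pass plus dict-format pass.
import Mathlib
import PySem

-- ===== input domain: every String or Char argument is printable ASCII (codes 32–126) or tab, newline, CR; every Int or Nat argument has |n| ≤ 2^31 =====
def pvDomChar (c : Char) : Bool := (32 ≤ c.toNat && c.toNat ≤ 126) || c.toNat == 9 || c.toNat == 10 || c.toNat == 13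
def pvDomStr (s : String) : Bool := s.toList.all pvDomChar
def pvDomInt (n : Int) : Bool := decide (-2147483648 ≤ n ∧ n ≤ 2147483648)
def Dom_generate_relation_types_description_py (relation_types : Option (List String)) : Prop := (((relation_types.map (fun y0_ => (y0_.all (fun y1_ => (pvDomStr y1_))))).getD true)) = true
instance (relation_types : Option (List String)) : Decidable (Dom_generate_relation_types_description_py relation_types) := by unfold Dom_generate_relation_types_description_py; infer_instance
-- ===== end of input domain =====

-- B replaces A's dict-filter-then-format passes by one streaming pass over a pre-rendered flat line stream with lazy header emission (objective: alternative).

-- ===== PORT A =====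
-- the literal dict from the source, as an association list in insertion order (all keys distinct)
def pvAllTypes : List (String × List String) :=
  [
    ("层次关系",
      [ "is_a (是一个): 表示类别归属关系",
        "part_of (部分-整体): 表示组成关系",
        "belongs_to (从属): 表示归属关系" ]),
    ("动作关系",
      [ "creates (创建): 表示创建或生产关系",
        "uses (使用): 表示使用或应用关系",
        "affects (影响): 表示影响或作用关系",
        "controls (控制): 表示控制或管理关系" ]),
    ("属性关系",
      [ "has_property (具有属性): 表示特征属性",
        "has_value (具有值): 表示数值属性",
        "has_state (具有状态): 表示状态属性" ]),
    ("时间关系",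
      [ "happens_before (发生在...之前): 表示时间先后顺序",
        "happens_after (发生在...之后): 表示时间后续关系",
        "happens_at (发生于): 表示时间点关系" ]),
    ("空间关系",
      [ "located_in (位于): 表示位置关系",
        "near_to (靠近): 表示proximity关系",
        "far_from (远离): 表示距离关系" ]),
    ("逻辑关系",
      [ "causes (导致): 表示因果关系",
        "results_in (结果是): 表示结果关系",
        "depends_on (依赖于): 表示依赖关系" ]),
    ("社会关系",
      [ "works_for (工作于): 表示工作关系",
        "collaborates_with (合作): 表示合作关系",
        "competes_with (竞争): 表示竞争关系" ]) ]

-- port of A: filter pass building filtered_types (a dict with fresh keys only, so insert = append), then a formatting pass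
def generate_relation_types_description_py (relation_types : Option (List String)) : String :=
  let all_types := pvAllTypes
  let types_to_use : List (String × List String) :=
    match relation_types with
    | some rts =>
        if !rts.isEmpty then
          -- 'if relation_types:' truthy branch
          all_types.foldl (fun ft p =>
            let filtered := p.2.filter (fun t => rts.any (fun rt => PySem.Str.isIn rt t))
            if !filtered.isEmpty then ft ++ [(p.1, filtered)] else ft) []
        else all_types
    | none => all_types
  let description := types_to_use.foldl (fun d p =>
      (d ++ [("\n" ++ p.1 ++ ":")]) ++ p.2.map (fun t => "- " ++ t)) []
  PySem.Str.join "\n" description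

-- ===== PORT B =====
-- Source B's module constant _LINES: the rendered catalogue as a flat stream of text lines
def pvLines : List String :=
  [ "",
    "层次关系:",
    "- is_a (是一个): 表示类别归属关系",
    "- part_of (部分-整体): 表示组成关系",
    "- belongs_to (从属): 表示归属关系",
    "",
    "动作关系:",
    "- creates (创建): 表示创建或生产关系",
    "- uses (使用): 表示使用或应用关系",
    "- affects (影响): 表示影响或作用关系",
    "- controls (控制): 表示控制或管理关系",
    "",
    "属性关系:",
    "- has_property (具有属性): 表示特征属性",
    "- has_value (具有值): 表示数值属性",
    "- has_state (具有状态): 表示状态属性",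
    "",
    "时间关系:",
    "- happens_before (发生在...之前): 表示时间先后顺序",
    "- happens_after (发生在...之后): 表示时间后续关系",
    "- happens_at (发生于): 表示时间点关系",
    "",
    "空间关系:",
    "- located_in (位于): 表示位置关系",
    "- near_to (靠近): 表示proximity关系",
    "- far_from (远离): 表示距离关系",
    "",
    "逻辑关系:",
    "- causes (导致): 表示因果关系",
    "- results_in (结果是): 表示结果关系",
    "- depends_on (依赖于): 表示依赖关系",
    "",
    "社会关系:",
    "- works_for (工作于): 表示工作关系",
    "- collaborates_with (合作): 表示合作关系",
    "- competes_with (竞争): 表示竞争关系" ]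

-- the body of Source B's for-loop, on state (out, pending)
def pvStep (rts : List String) (st : List String × List String) (ln : String) : List String × List String :=
  if PySem.Str.startswith ln "- " then
    if rts.any (fun rt => PySem.Str.isIn rt (PySem.Str.slice ln (some 2) none)) then
      (st.1 ++ st.2 ++ [ln], [])
    else st
  else if ln == "" then (st.1, [ln])
  else (st.1, st.2 ++ [ln])

-- port of B (Source B): single pass over the line stream, emitting pending header lines lazily
def generate_relation_types_description_py_alt (relation_types : Option (List String)) : String :=
  let isFalsy := match relation_types with | none => true | some rts => rts.isEmpty
  if isFalsy then PySem.Str.join "\n" pvLines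
  else
    let rts := relation_types.getD []
    let st := pvLines.foldl (pvStep rts) ([], [])
    PySem.Str.join "\n" st.1

-- ===== PRECONDITION & SPEC =====
def Spec_generate_relation_types_description_py (relation_types : Option (List String)) (out : String) : Prop := out = generate_relation_types_description_py_alt relation_types
instance (relation_types : Option (List String)) (out : String) : Decidable (Spec_generate_relation_types_description_py relation_types out) := by unfold Spec_generate_relation_types_description_py; infer_instance

-- ===== CLAIM (what is proved, stated in full; the proofs are below) =====
def Claim_equal_generate_relation_types_description_py : Prop := ∀ (relation_types : Option (List String)), Dom_generate_relation_types_description_py relation_types → Spec_generate_relation_types_description_py relation_types (generate_relation_types_description_py relation_types)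

-- ===== LEMMAS AND PROOFS =====

-- Source B's line constant is exactly the per-category groups (blank line, header, '- ' items) flattened
theorem pvLines_eq :
    pvLines = pvAllTypes.flatMap (fun p => "" :: (p.1 ++ ":") :: p.2.map (fun t => "- " ++ t)) := by
  decide

-- every header line of the table: not '- '-prefixed and nonempty
theorem pv_headers_ok : ∀ p ∈ pvAllTypes,
    PySem.Str.startswith (p.1 ++ ":") "- " = false ∧ ((p.1 ++ ":") == "") = false := by
  decide

-- stripping the '- ' prefix
theorem pv_drop2 (t : String) : PySem.Str.slice ("- " ++ t) (some 2) none = t := by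
  rw [← String.toList_inj]
  simp only [PySem.Str.slice, PySem.Chars.slice_eq_listSlice, String.toList_append]
  rw [show ((2 : Int)) = ((2 : Nat) : Int) by norm_num, PySem.List.slice_from_natCast]
  rw [show "- ".toList = ['-', ' '] from rfl]
  simp

-- every '- '-prefixed line is recognised by the loop's startswith test
theorem pv_startswith_pre (t : String) : PySem.Str.startswith ("- " ++ t) "- " = true := by
  simp [PySem.Str.startswith, PySem.Chars.startswith]

-- the three actions of the loop body
theorem pv_startswith_blank : PySem.Str.startswith "" "- " = false := by decide

theorem pvStep_item (rts : List String) (st : List String × List String) (t : String) :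
    pvStep rts st ("- " ++ t) =
      if rts.any (fun rt => PySem.Str.isIn rt t) then (st.1 ++ st.2 ++ ["- " ++ t], []) else st := by
  unfold pvStep
  rw [pv_startswith_pre, pv_drop2]
  simp

theorem pvStep_blank (rts : List String) (st : List String × List String) :
    pvStep rts st "" = (st.1, [""]) := by
  unfold pvStep
  rw [pv_startswith_blank]
  simp

theorem pvStep_header (rts : List String) (st : List String × List String) (h : String)
    (h1 : PySem.Str.startswith h "- " = false) (h2 : (h == "") = false) :
    pvStep rts st h = (st.1, st.2 ++ [h]) := by
  unfold pvStep
  rw [h1, h2]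
  simp

-- the loop over one category's item lines: flushes pending at the first kept item
theorem pv_step_items (rts : List String) (ts : List String) (out pending : List String) :
    (ts.map (fun t => "- " ++ t)).foldl (pvStep rts) (out, pending) =
      (out ++ (if ((ts.filter (fun t => rts.any (fun rt => PySem.Str.isIn rt t))).isEmpty) then []
               else pending ++ (ts.filter (fun t => rts.any (fun rt => PySem.Str.isIn rt t))).map (fun t => "- " ++ t)),
       if ((ts.filter (fun t => rts.any (fun rt => PySem.Str.isIn rt t))).isEmpty) then pending else []) := by
  induction ts generalizing out pending with
  | nil => simp
  | cons t ts ih =>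
      simp only [List.map_cons, List.foldl_cons, List.filter_cons, pvStep_item]
      by_cases hk : rts.any (fun rt => PySem.Str.isIn rt t)
      · simp only [hk, if_true, ih]
        by_cases he : (ts.filter (fun t => rts.any (fun rt => PySem.Str.isIn rt t))).isEmpty
        · simp [List.append_assoc]
        · simp [List.append_assoc]
      · simp only [hk, ih]
        simp

-- the loop over the flattened groups: output = kept groups, each with its blank+header flushed
theorem pv_step_groups (rts : List String) (gs : List (String × List String))
    (hgs : ∀ p ∈ gs, PySem.Str.startswith (p.1 ++ ":") "- " = false ∧ ((p.1 ++ ":") == "") = false)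
    (out pending : List String) :
    ((gs.flatMap (fun p => "" :: (p.1 ++ ":") :: p.2.map (fun t => "- " ++ t))).foldl (pvStep rts) (out, pending)).1 =
      out ++ (gs.filter (fun p => !((p.2.filter (fun t => rts.any (fun rt => PySem.Str.isIn rt t))).isEmpty))).flatMap
        (fun p => "" :: (p.1 ++ ":") :: (p.2.filter (fun t => rts.any (fun rt => PySem.Str.isIn rt t))).map (fun t => "- " ++ t)) := by
  induction gs generalizing out pending with
  | nil => simp
  | cons p gs ih =>
      have hp := hgs p (List.mem_cons_self)
      have hgs' : ∀ q ∈ gs, PySem.Str.startswith (q.1 ++ ":") "- " = false ∧ ((q.1 ++ ":") == "") = false :=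
        fun q hq => hgs q (List.mem_cons_of_mem _ hq)
      simp only [List.flatMap_cons, List.foldl_append, List.foldl_cons, List.filter_cons]
      rw [pvStep_blank, pvStep_header rts _ _ hp.1 hp.2, pv_step_items]
      by_cases he : ((p.2.filter (fun t => rts.any (fun rt => PySem.Str.isIn rt t))).isEmpty)
      · simp only [he, if_true, List.append_nil]
        rw [ih hgs']
        simp
      · simp only [he]
        rw [ih hgs']
        simp [List.append_assoc]

-- '\n'.join over (a :: l) ++ ys with ys nonempty splits at the seam
theorem pv_join_cons_append (nl a : List Char) (l ys : List (List Char)) (hys : ys ≠ []) :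
    PySem.Chars.join nl ((a :: l) ++ ys) = PySem.Chars.join nl (a :: l) ++ nl ++ PySem.Chars.join nl ys := by
  induction l generalizing a with
  | nil =>
      cases ys with
      | nil => exact absurd rfl hys
      | cons y ys' =>
          have h1 : ((a :: ([] : List (List Char))) ++ y :: ys') = a :: y :: ys' := rfl
          rw [h1, PySem.Chars.join_cons_cons, PySem.Chars.join_singleton]
  | cons b l' ih =>
      have h2 : ((a :: b :: l') ++ ys) = a :: ((b :: l') ++ ys) := rfl
      have h3 : ((b :: l') ++ ys : List (List Char)) = b :: (l' ++ ys) := rfl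
      have h4 : PySem.Chars.join nl (a :: ((b :: l') ++ ys)) =
          a ++ nl ++ PySem.Chars.join nl ((b :: l') ++ ys) := by
        rw [h3]; exact PySem.Chars.join_cons_cons nl a b (l' ++ ys)
      rw [h2, h4, ih b, PySem.Chars.join_cons_cons]
      simp [List.append_assoc]

-- one group: '\n'-prefixed header = blank line + bare header
theorem pv_join_groupAB (nl h c : List Char) (cs : List (List Char)) :
    PySem.Chars.join nl ((nl ++ h) :: c :: cs) = PySem.Chars.join nl ([] :: h :: c :: cs) := by
  rw [PySem.Chars.join_cons_cons, PySem.Chars.join_cons_cons, PySem.Chars.join_cons_cons]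
  simp [List.append_assoc]

-- joining A-shaped groups ('\n'-prefixed header) = joining B-shaped groups (blank line + bare header)
theorem pv_join_AB (nl : List Char) :
    ∀ ps : List (List Char × List (List Char)), (∀ p ∈ ps, p.2 ≠ []) →
    PySem.Chars.join nl (ps.flatMap (fun p => (nl ++ p.1) :: p.2)) =
      PySem.Chars.join nl (ps.flatMap (fun p => [] :: p.1 :: p.2)) := by
  intro ps
  induction ps with
  | nil => intro _; rfl
  | cons p ps' ih =>
      intro h
      have hq : p.2 ≠ [] := h p (List.mem_cons_self)
      have hqs' : ∀ r ∈ ps', r.2 ≠ [] := fun r hr => h r (List.mem_cons_of_mem _ hr)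
      obtain ⟨c, cs, hcc⟩ : ∃ c cs, p.2 = c :: cs := by
        cases hq2 : p.2 with
        | nil => exact absurd hq2 hq
        | cons c cs => exact ⟨c, cs, rfl⟩
      cases ps' with
      | nil =>
          simp only [List.flatMap_cons, List.flatMap_nil, List.append_nil]
          rw [hcc]
          exact pv_join_groupAB nl p.1 c cs
      | cons r rs =>
          have hflatA : (r :: rs).flatMap (fun p => (nl ++ p.1) :: p.2) ≠ [] := by
            simp [List.flatMap_cons]
          have hflatB : (r :: rs).flatMap (fun p => ([] : List Char) :: p.1 :: p.2) ≠ [] := by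
            simp [List.flatMap_cons]
          have hA : (p :: r :: rs).flatMap (fun p => (nl ++ p.1) :: p.2) =
              ((nl ++ p.1) :: p.2) ++ (r :: rs).flatMap (fun p => (nl ++ p.1) :: p.2) := by
            simp [List.flatMap_cons]
          have hB : (p :: r :: rs).flatMap (fun p => ([] : List Char) :: p.1 :: p.2) =
              (([] : List Char) :: p.1 :: p.2) ++ (r :: rs).flatMap (fun p => ([] : List Char) :: p.1 :: p.2) := by
            simp [List.flatMap_cons]
          rw [hA, hB, pv_join_cons_append nl (nl ++ p.1) p.2 _ hflatA,
              pv_join_cons_append nl [] (p.1 :: p.2) _ hflatB,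
              ih hqs', hcc, pv_join_groupAB nl p.1 c cs]

-- String-level version over generic (header, kept lines) groups
theorem pv_join_AB_str (ps : List (String × List String)) (h : ∀ p ∈ ps, p.2 ≠ []) :
    PySem.Str.join "\n" (ps.flatMap (fun p => ("\n" ++ p.1) :: p.2)) =
    PySem.Str.join "\n" (ps.flatMap (fun p => "" :: p.1 :: p.2)) := by
  rw [← String.toList_inj]
  simp only [PySem.Str.toList_join]
  have key := pv_join_AB "\n".toList
    (ps.map (fun p => (p.1.toList, p.2.map String.toList)))
    (by
      intro q hq
      simp only [List.mem_map] at hq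
      obtain ⟨p, hp, rfl⟩ := hq
      have hp2 := h p hp
      simp only [ne_eq, List.map_eq_nil_iff]
      exact hp2)
  have hL : ((ps.flatMap (fun p => ("\n" ++ p.1) :: p.2)).map String.toList) =
      (ps.map (fun p => (p.1.toList, p.2.map String.toList))).flatMap
        (fun q => ("\n".toList ++ q.1) :: q.2) := by
    simp [List.map_flatMap, List.flatMap_map]
  have hR : ((ps.flatMap (fun p => "" :: p.1 :: p.2)).map String.toList) =
      (ps.map (fun p => (p.1.toList, p.2.map String.toList))).flatMap
        (fun q => [] :: q.1 :: q.2) := by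
    simp [List.map_flatMap, List.flatMap_map]
  rw [hL, hR, key]

-- A's filter pass then formatting pass, written as filter/map/flatMap
theorem pv_descA_eq (keep : String → Bool) (ps : List (String × List String)) :
    (ps.foldl (fun ft p =>
        if !(p.2.filter keep).isEmpty then ft ++ [(p.1, p.2.filter keep)] else ft) []).foldl
      (fun d p => (d ++ [("\n" ++ p.1 ++ ":")]) ++ p.2.map (fun t => "- " ++ t)) [] =
    ((ps.filter (fun p => !(p.2.filter keep).isEmpty)).map
        (fun p => (p.1, p.2.filter keep))).flatMap
      (fun p => ("\n" ++ p.1 ++ ":") :: p.2.map (fun t => "- " ++ t)) := by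
  have h1 : (ps.foldl (fun ft p =>
        if !(p.2.filter keep).isEmpty then ft ++ [(p.1, p.2.filter keep)] else ft) []) =
      (ps.filter (fun p => !(p.2.filter keep).isEmpty)).map (fun p => (p.1, p.2.filter keep)) := by
    simpa using PySem.List.foldl_append_if
      (fun p => !((p.2 : List String).filter keep).isEmpty)
      (fun p => ((p.1 : String), p.2.filter keep)) ps []
  rw [h1]
  have h2 := PySem.List.foldl_append_eq_flatMap
      (fun p : String × List String => ("\n" ++ p.1 ++ ":") :: p.2.map (fun t => "- " ++ t))
      ((ps.filter (fun p => !(p.2.filter keep).isEmpty)).map (fun p => (p.1, p.2.filter keep))) []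
  simp only [List.append_assoc, List.singleton_append]
  simpa using h2

-- A's single formatting pass over an unfiltered pair list, as a flatMap
theorem pv_descA_plain_eq (ps : List (String × List String)) :
    (ps.foldl (fun d p => (d ++ [("\n" ++ p.1 ++ ":")]) ++ p.2.map (fun t => "- " ++ t)) []) =
    ps.flatMap (fun p => ("\n" ++ p.1 ++ ":") :: p.2.map (fun t => "- " ++ t)) := by
  have h2 := PySem.List.foldl_append_eq_flatMap
      (fun p : String × List String => ("\n" ++ p.1 ++ ":") :: p.2.map (fun t => "- " ++ t)) ps []
  simp only [List.append_assoc, List.singleton_append]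
  simpa using h2

-- all type lists of the table are nonempty
theorem pv_table_nonempty : ∀ p ∈ pvAllTypes, p.2 ≠ [] := by decide

-- unfiltered: A's flatMap shape joins to the same string as the full line stream
theorem pv_plain_AB :
    PySem.Str.join "\n" (pvAllTypes.flatMap (fun p => ("\n" ++ p.1 ++ ":") :: p.2.map (fun t => "- " ++ t))) =
    PySem.Str.join "\n" (pvAllTypes.flatMap (fun p => "" :: (p.1 ++ ":") :: p.2.map (fun t => "- " ++ t))) := by
  have key := pv_join_AB_str (pvAllTypes.map (fun p => (p.1 ++ ":", p.2.map (fun t => "- " ++ t))))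
    (by
      intro q hq
      simp only [List.mem_map] at hq
      obtain ⟨p, hp, rfl⟩ := hq
      simpa using pv_table_nonempty p hp)
  simp only [List.flatMap_map] at key
  simpa [String.append_assoc] using key

-- filtered: A's flatMap shape joins to the same string as B's state-machine output
theorem pv_filtered_AB (l : List String) :
    PySem.Str.join "\n"
      ((pvAllTypes.filter (fun p => !(p.2.filter (fun t => l.any (fun rt => PySem.Str.isIn rt t))).isEmpty)).flatMap
        (fun p => ("\n" ++ p.1 ++ ":") :: ((p.2.filter (fun t => l.any (fun rt => PySem.Str.isIn rt t))).map (fun t => "- " ++ t)))) =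
    PySem.Str.join "\n"
      ([] ++ (pvAllTypes.filter (fun p => !(p.2.filter (fun t => l.any (fun rt => PySem.Str.isIn rt t))).isEmpty)).flatMap
        (fun p => "" :: (p.1 ++ ":") :: (p.2.filter (fun t => l.any (fun rt => PySem.Str.isIn rt t))).map (fun t => "- " ++ t))) := by
  have key := pv_join_AB_str
    ((pvAllTypes.filter (fun p => !(p.2.filter (fun t => l.any (fun rt => PySem.Str.isIn rt t))).isEmpty)).map
      (fun p => (p.1 ++ ":", (p.2.filter (fun t => l.any (fun rt => PySem.Str.isIn rt t))).map (fun t => "- " ++ t))))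
    (by
      intro q hq
      simp only [List.mem_map] at hq
      obtain ⟨p, hp, rfl⟩ := hq
      have h3 := List.of_mem_filter hp
      simpa using h3)
  simp only [List.flatMap_map] at key
  simpa [String.append_assoc] using key

-- ===== VERDICT (by name: the statement is the Claim_ definition above) =====
theorem generate_relation_types_description_py_spec : Claim_equal_generate_relation_types_description_py := by
  intro relation_types _
  unfold Spec_generate_relation_types_description_py
  cases relation_types with
  | none =>
      have hA : generate_relation_types_description_py none =
          PySem.Str.join "\n" (pvAllTypes.foldl (fun d p =>
            (d ++ [("\n" ++ p.1 ++ ":")]) ++ p.2.map (fun t => "- " ++ t)) []) := rfl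
      have hB : generate_relation_types_description_py_alt none = PySem.Str.join "\n" pvLines := rfl
      rw [hA, hB, pv_descA_plain_eq pvAllTypes, pvLines_eq, pv_plain_AB]
  | some l =>
      by_cases hl : l.isEmpty
      · obtain rfl : l = [] := List.isEmpty_iff.mp hl
        have hA : generate_relation_types_description_py (some []) =
            PySem.Str.join "\n" (pvAllTypes.foldl (fun d p =>
              (d ++ [("\n" ++ p.1 ++ ":")]) ++ p.2.map (fun t => "- " ++ t)) []) := rfl
        have hB : generate_relation_types_description_py_alt (some []) = PySem.Str.join "\n" pvLines := rfl
        rw [hA, hB, pv_descA_plain_eq pvAllTypes, pvLines_eq, pv_plain_AB]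
      · have hl' : l.isEmpty = false := by simpa using hl
        unfold generate_relation_types_description_py generate_relation_types_description_py_alt
        simp only [hl', Option.getD_some, Bool.not_false, if_true, Bool.false_eq_true, if_false]
        rw [pv_descA_eq (fun t => l.any (fun rt => PySem.Str.isIn rt t)) pvAllTypes]
        simp only [List.flatMap_map]
        rw [pvLines_eq, pv_step_groups l pvAllTypes pv_headers_ok [] []]
        exact pv_filtered_AB l
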